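-- pv_equiv track=rewrite | github.com/BingTony/GetToken | PageReplacement/PageReplacement.py | findMinShift
-- ===== SOURCE A (Python) =====
-- def findMinShift( frame, shiftReg ):
--     num = 0 #min
--     str_i = ''
--     str_min = ''
--     for i in range( len( frame ) ):
--         str_i = ''.join( str( s ) for s in shiftReg[frame[i]] )    #list to string
--         str_min = ''.join( str( s ) for s in shiftReg[frame[num]] )
--         if str_i < str_min:
--             num = i
--     return num
-- ===== SOURCE B (Python) =====
-- def findMinShift(frame, shiftReg):
--     order = sorted(range(len(frame)),
--                    key=lambda i: ''.join(str(s) for s in shiftReg[frame[i]]))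
--     return order[0] if order else 0
-- ===== Notes on version B (the rewrite author's own statement) =====
-- stated objective: alternative
-- what changed: A's fused running-argmin scan is replaced by sorting the frame indices by their joined register string (Python's stable sort) and returning the first index of the sorted order; stability gives A's earliest-index tie-break.
import Mathlib
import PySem

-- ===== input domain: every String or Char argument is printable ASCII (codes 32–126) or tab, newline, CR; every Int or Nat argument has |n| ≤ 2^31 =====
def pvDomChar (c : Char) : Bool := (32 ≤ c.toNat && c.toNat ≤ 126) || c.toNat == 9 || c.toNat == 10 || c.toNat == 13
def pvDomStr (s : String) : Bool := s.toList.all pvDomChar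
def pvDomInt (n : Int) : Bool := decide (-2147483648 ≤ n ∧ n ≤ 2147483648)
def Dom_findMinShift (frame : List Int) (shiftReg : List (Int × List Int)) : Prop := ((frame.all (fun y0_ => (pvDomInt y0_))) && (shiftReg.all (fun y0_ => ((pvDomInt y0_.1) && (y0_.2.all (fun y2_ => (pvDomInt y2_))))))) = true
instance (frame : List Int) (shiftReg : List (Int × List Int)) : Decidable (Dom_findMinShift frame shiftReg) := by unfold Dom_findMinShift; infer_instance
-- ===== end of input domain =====

-- B sorts the frame indices by their joined register string (stable sort) and takes the head,
-- instead of A's fused running-argmin scan; objective: alternative.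

-- ===== PORT A =====
-- ''.join(str(s) for s in shiftReg[k]); the dict lookup is total via getD, Pre_ guarantees the key exists
def pvKey (shiftReg : List (Int × List Int)) (k : Int) : String :=
  PySem.Str.join "" (((List.lookup k shiftReg).getD []).map PySem.Int.toStr)

def findMinShift (frame : List Int) (shiftReg : List (Int × List Int)) : Int :=
  ((List.range frame.length).foldl (fun num i =>
      let str_i := pvKey shiftReg (frame.getD i 0)
      let str_min := pvKey shiftReg (frame.getD num 0)
      if str_i < str_min then i else num) 0 : Nat)

-- ===== PORT B =====
def findMinShift_alt (frame : List Int) (shiftReg : List (Int × List Int)) : Int :=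
  let order := PySem.List.sorted (List.range frame.length)
                 (fun i => pvKey shiftReg (frame.getD i 0)) false
  match order with
  | [] => 0
  | r :: _ => (r : Nat)

-- ===== PRECONDITION & SPEC =====
-- Pre_ excludes exactly the inputs where A raises KeyError: a frame entry absent from shiftReg.
def Pre_findMinShift (frame : List Int) (shiftReg : List (Int × List Int)) : Prop :=
  ∀ x ∈ frame, (List.lookup x shiftReg).isSome
instance (frame : List Int) (shiftReg : List (Int × List Int)) : Decidable (Pre_findMinShift frame shiftReg) := by unfold Pre_findMinShift; infer_instance

def pvWitness_findMinShift : List Int × (List (Int × List Int)) := ([2, 1, 2], [(1, [3, 0]), (2, [2, 9])])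

def Spec_findMinShift (frame : List Int) (shiftReg : List (Int × List Int)) (out : Int) : Prop := out = findMinShift_alt frame shiftReg
instance (frame : List Int) (shiftReg : List (Int × List Int)) (out : Int) : Decidable (Spec_findMinShift frame shiftReg out) := by unfold Spec_findMinShift; infer_instance

-- ===== CLAIM (what is proved, stated in full; the proofs are below) =====
def Claim_equal_findMinShift : Prop := ∀ (frame : List Int) (shiftReg : List (Int × List Int)), Dom_findMinShift frame shiftReg → Pre_findMinShift frame shiftReg → Spec_findMinShift frame shiftReg (findMinShift frame shiftReg)

-- ===== LEMMAS AND PROOFS =====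

-- head of insertBy with the key-< rule: the smaller-key element of (x, current head)
theorem pv_head_insertBy {α κ : Type} [LinearOrder κ] (key : α → κ) (x h : α) (t : List α) :
    PySem.List.insertBy (fun a b => decide (key a < key b)) x (h :: t)
      = if key x < key h then x :: h :: t
        else h :: PySem.List.insertBy (fun a b => decide (key a < key b)) x t := by
  simp [PySem.List.insertBy]

-- invariant: the head of the insertBy fold satisfies A's running-argmin recurrence
theorem pv_head_foldl_insertBy {α κ : Type} [LinearOrder κ] (key : α → κ)
    (l : List α) (h : α) (t : List α) :
    ∃ t', (l.foldl (fun acc x => PySem.List.insertBy (fun a b => decide (key a < key b)) x acc) (h :: t))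
      = (l.foldl (fun num i => if key i < key num then i else num) h) :: t' := by
  induction l generalizing h t with
  | nil => exact ⟨t, rfl⟩
  | cons x l ih =>
    simp only [List.foldl_cons, pv_head_insertBy]
    by_cases hx : key x < key h
    · simpa [hx] using ih x (h :: t)
    · simpa [hx] using ih h _

-- ===== VERDICT (by name: the statement is the Claim_ definition above) =====
theorem findMinShift_spec : Claim_equal_findMinShift := by
  intro frame shiftReg _ _
  unfold Spec_findMinShift findMinShift findMinShift_alt
  set key : Nat → String := fun i => pvKey shiftReg (frame.getD i 0) with hkey
  rw [PySem.List.sorted_eq_foldl_insertBy]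
  cases hn : frame.length with
  | zero => simp [hn]
  | succ m =>
    rw [List.range_succ_eq_map]
    simp only [List.foldl_cons, PySem.List.insertBy]
    obtain ⟨t', ht'⟩ := pv_head_foldl_insertBy key ((List.range m).map (· + 1)) 0 []
    rw [ht']
    have hA : (0 :: (List.range m).map (· + 1)).foldl
        (fun num i => if key i < key num then i else num) 0
        = ((List.range m).map (· + 1)).foldl (fun num i => if key i < key num then i else num) 0 := by
      simp
    rw [← hA]
    simp [hkey]
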